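-- pv_equiv track=rewrite | github.com/AkshataUV/LedgerAI | parser_backend/services/pdf_service.py | _overlay_lines
-- ===== SOURCE A (Python) =====
-- from typing import List, Optional, Dict, Tuple
--
-- def _overlay_lines(group: List[str]) -> str:
--     """
--     Merge a list of lines by character-grid overlay.
--     Lines are processed in order; each grid column takes the *first*
--     non-space character encountered across all lines.
--     """
--     if not group:
--         return ''
--     if len(group) == 1:
--         return group[0]
--     max_w = max(len(l) for l in group)
--     grid = [' '] * max_w
--     for line in group:
--         for col, ch in enumerate(line):
--             if col < max_w and ch != ' ' and grid[col] == ' ':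
--                 grid[col] = ch
--     return ''.join(grid).rstrip()
-- ===== SOURCE B (Python) =====
-- from typing import List
--
-- def _overlay_lines(group: List[str]) -> str:
--     if not group:
--         return ''
--     if len(group) == 1:
--         return group[0]
--     max_w = max(len(l) for l in group)
--     out = []
--     for col in range(max_w):
--         ch = ' '
--         for line in group:
--             if col < len(line) and line[col] != ' ':
--                 ch = line[col]
--                 break
--         out.append(ch)
--     return ''.join(out).rstrip()
-- ===== Notes on version B (the rewrite author's own statement) =====
-- stated objective: faster
-- what changed: Column-major construction: for each grid column scan the lines in order and take the first non-space character (early break), instead of A's row-major pass mutating a space-filled grid with a 'cell still blank' test per character.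
import Mathlib
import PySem

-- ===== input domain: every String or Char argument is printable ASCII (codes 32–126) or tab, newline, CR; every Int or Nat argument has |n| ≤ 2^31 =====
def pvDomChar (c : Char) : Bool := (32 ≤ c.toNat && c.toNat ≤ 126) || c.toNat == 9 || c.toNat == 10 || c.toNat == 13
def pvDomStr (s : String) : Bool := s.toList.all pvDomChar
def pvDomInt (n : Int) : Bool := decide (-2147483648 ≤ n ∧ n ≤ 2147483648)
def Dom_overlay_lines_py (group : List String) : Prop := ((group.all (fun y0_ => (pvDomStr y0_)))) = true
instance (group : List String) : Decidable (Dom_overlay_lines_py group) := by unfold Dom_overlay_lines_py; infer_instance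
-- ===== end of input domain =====

-- B replaces A's row-major mutation of a space-filled grid by a column-major scan that takes the
-- first non-space character per column and breaks early (measured constant-factor speedup).

-- ===== PORT A =====
-- one step of `for line in group: for col, ch in enumerate(line): if …: grid[col] = ch`
def pvStepA (max_w : Nat) (grid : List Char) (p : Int × Char) : List Char :=
  if p.1 < (max_w : Int) ∧ p.2 ≠ ' ' ∧ PySem.List.pyGetD grid p.1 ' ' = ' '
  then PySem.List.pySetD grid p.1 p.2 else grid

def overlay_lines_py (group : List String) : String :=
  match group with
  | [] => ""
  | [l] => l
  | _ =>
    let ls := group.map String.toList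
    let max_w : Nat := (ls.map List.length).foldl max 0
    let grid : List Char := List.replicate max_w ' '
    let grid := ls.foldl (fun g line => (PySem.List.enumerate line 0).foldl (pvStepA max_w) g) grid
    String.ofList (PySem.Chars.rstrip grid)

-- ===== PORT B =====
-- first non-space character of column `col`, scanning the lines in order (the inner break)
def pvFirstAt (ls : List (List Char)) (col : Nat) : Char :=
  match ls with
  | [] => ' '
  | l :: rest =>
    match GetElem?.getElem? l col with
    | some c => if c ≠ ' ' then c else pvFirstAt rest col
    | none => pvFirstAt rest col

def overlay_lines_py_alt (group : List String) : String :=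
  match group with
  | [] => ""
  | l :: rest =>
    if rest.isEmpty then l
    else
      let ls := group.map String.toList
      let max_w : Nat := (ls.map List.length).foldl max 0
      String.ofList (PySem.Chars.rstrip ((List.range max_w).map (pvFirstAt ls)))

-- ===== PRECONDITION & SPEC =====
def Spec_overlay_lines_py (group : List String) (out : String) : Prop := out = overlay_lines_py_alt group
instance (group : List String) (out : String) : Decidable (Spec_overlay_lines_py group out) := by unfold Spec_overlay_lines_py; infer_instance

-- ===== CLAIM (what is proved, stated in full; the proofs are below) =====
def Claim_equal_overlay_lines_py : Prop := ∀ (group : List String), Dom_overlay_lines_py group → Spec_overlay_lines_py group (overlay_lines_py group)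

-- ===== LEMMAS AND PROOFS =====

-- effect of one line on a single column (proof-only helper)
def pvColHit (line : List Char) (s j : Nat) (d : Char) : Char :=
  match GetElem?.getElem? line (j - s) with
  | some c => if s ≤ j ∧ c ≠ ' ' then c else d
  | none => d

theorem pvColHit_nil (s j : Nat) (d : Char) : pvColHit [] s j d = d := by
  simp [pvColHit]

theorem pvColHit_lt (line : List Char) (s j : Nat) (d : Char) (h : j < s) :
    pvColHit line s j d = d := by
  unfold pvColHit
  split <;> simp_all

theorem pvColHit_cons_self (c : Char) (cs : List Char) (s : Nat) (d : Char) :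
    pvColHit (c :: cs) s s d = if c ≠ ' ' then c else d := by
  simp [pvColHit]

theorem pvColHit_zero (line : List Char) (j : Nat) (d : Char) :
    pvColHit line 0 j d = (match GetElem?.getElem? line j with
      | some c => if c ≠ ' ' then c else d
      | none => d) := by
  unfold pvColHit
  simp

theorem pvColHit_cons_ne (c : Char) (cs : List Char) (s j : Nat) (d : Char) (h : j ≠ s) :
    pvColHit (c :: cs) s j d = pvColHit cs (s + 1) j d := by
  rcases Nat.lt_or_ge j s with hlt | hge
  · rw [pvColHit_lt _ _ _ _ hlt, pvColHit_lt _ _ _ _ (by omega)]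
  · have hj : s < j := by omega
    have hsub : j - s = (j - (s + 1)) + 1 := by omega
    unfold pvColHit
    rw [hsub, List.getElem?_cons_succ]
    split <;> simp_all

theorem length_pvStepA (max_w : Nat) (g : List Char) (p : Int × Char) :
    (pvStepA max_w g p).length = g.length := by
  unfold pvStepA; split
  · exact PySem.List.length_pySetD ..
  · rfl

theorem length_inner_fold (max_w : Nat) (line : List Char) (s : Int) (g : List Char) :
    ((PySem.List.enumerate line s).foldl (pvStepA max_w) g).length = g.length := by
  induction line generalizing s g with
  | nil => rfl
  | cons c cs ih => simp [PySem.List.enumerate_cons, ih, length_pvStepA]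

theorem getElem?_pvStepA_ne (max_w : Nat) (g : List Char) (s : Nat) (c : Char) (j : Nat)
    (h : s ≠ j) :
    GetElem?.getElem? (pvStepA max_w g ((s : Int), c)) j = GetElem?.getElem? g j := by
  unfold pvStepA
  split
  · rw [show (((s : Int)), c).2 = c from rfl, show (((s : Int)), c).1 = (s : Int) from rfl,
        PySem.List.pySetD_natCast]
    exact List.getElem?_set_ne h
  · rfl

theorem inner_fold_get? (max_w : Nat) (line : List Char) (s : Nat) (g : List Char)
    (hg : g.length = max_w) (j : Nat) :
    GetElem?.getElem? ((PySem.List.enumerate line (s : Int)).foldl (pvStepA max_w) g) j =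
      (GetElem?.getElem? g j).map (fun x => if x = ' ' then pvColHit line s j x else x) := by
  induction line generalizing s g with
  | nil =>
    rw [PySem.List.enumerate_nil, List.foldl_nil]
    cases GetElem?.getElem? g j <;> simp [pvColHit_nil]
  | cons c cs ih =>
    rw [PySem.List.enumerate_cons, List.foldl_cons,
        show ((s : Int) + 1) = (((s + 1 : Nat)) : Int) by push_cast; ring,
        ih (s + 1) (pvStepA max_w g ((s : Int), c)) (by rw [length_pvStepA]; exact hg)]
    by_cases hjs : j = s
    · subst hjs
      by_cases hin : j < g.length
      · have hget : GetElem?.getElem? g j = some (g[j]'hin) := List.getElem?_eq_getElem hin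
        have hgetD : PySem.List.pyGetD g (j : Int) ' ' = g[j]'hin := by
          simp [hget]
        by_cases hc : c = ' '
        · have hstep : pvStepA max_w g ((j : Int), c) = g := by
            unfold pvStepA; rw [if_neg]; simp [hc]
          rw [hstep, hget]
          simp only [Option.map_some]
          rw [pvColHit_lt cs (j + 1) j _ (by omega), pvColHit_cons_self]
          simp [hc]
        · by_cases hsp : g[j]'hin = ' '
          · have hstep : pvStepA max_w g ((j : Int), c) = g.set j c := by
              unfold pvStepA
              rw [if_pos ⟨by show ((j : Nat) : Int) < ((max_w : Nat) : Int); exact_mod_cast hg ▸ hin, hc,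
                by rw [show ((((j : Nat) : Int)), c).1 = ((j : Nat) : Int) from rfl, hgetD, hsp]⟩]
              simp [PySem.List.pySetD_natCast]
            rw [hstep, hget, List.getElem?_set_self (by simpa using hin)]
            simp only [Option.map_some]
            rw [if_neg hc, hsp, if_pos rfl, pvColHit_cons_self, if_pos hc]
          · have hstep : pvStepA max_w g ((j : Int), c) = g := by
              unfold pvStepA; rw [if_neg]
              intro hcond
              exact hsp (by rw [← hgetD]; exact hcond.2.2)
            rw [hstep, hget]
            simp only [Option.map_some]
            rw [if_neg hsp, if_neg hsp]
      · have hnone : GetElem?.getElem? g j = none := List.getElem?_eq_none (by omega)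
        have hstep : pvStepA max_w g ((j : Int), c) = g := by
          unfold pvStepA; rw [if_neg]
          intro hcond
          have h1 : ((j : Nat) : Int) < ((max_w : Nat) : Int) := hcond.1
          have h2 : j < max_w := by exact_mod_cast h1
          omega
        rw [hstep, hnone]
        simp
    · rw [getElem?_pvStepA_ne max_w g s c j (fun h => hjs h.symm)]
      cases GetElem?.getElem? g j <;> simp [pvColHit_cons_ne c cs s j _ hjs]

theorem outer_fold_get? (max_w : Nat) (ls : List (List Char)) (g : List Char)
    (hg : g.length = max_w) (j : Nat) :
    GetElem?.getElem? (ls.foldl (fun g line => (PySem.List.enumerate line 0).foldl (pvStepA max_w) g) g) j =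
      (GetElem?.getElem? g j).map (fun x => if x = ' ' then pvFirstAt ls j else x) := by
  induction ls generalizing g with
  | nil =>
    rw [List.foldl_nil]
    cases GetElem?.getElem? g j <;> simp [pvFirstAt]
  | cons l rest ih =>
    rw [List.foldl_cons,
        ih ((PySem.List.enumerate l 0).foldl (pvStepA max_w) g) (by rw [length_inner_fold]; exact hg)]
    have hinner := inner_fold_get? max_w l 0 g hg j
    simp only [Nat.cast_zero] at hinner
    rw [hinner]
    cases hgj : GetElem?.getElem? g j with
    | none => simp
    | some x =>
      by_cases hx : x = ' '
      · subst hx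
        cases hl : GetElem?.getElem? l j with
        | none => simp [pvFirstAt, pvColHit_zero, hl]
        | some c =>
          by_cases hc : c = ' '
          · simp [pvFirstAt, pvColHit_zero, hl, hc]
          · simp [pvFirstAt, pvColHit_zero, hl, hc]
      · simp [hx]

theorem grid_eq (max_w : Nat) (ls : List (List Char)) :
    (ls.foldl (fun g line => (PySem.List.enumerate line 0).foldl (pvStepA max_w) g) (List.replicate max_w ' '))
      = (List.range max_w).map (pvFirstAt ls) := by
  apply List.ext_getElem?
  intro j
  rw [outer_fold_get? max_w ls (List.replicate max_w ' ') (by simp) j]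
  by_cases hj : j < max_w
  · rw [List.getElem?_replicate_of_lt hj,
        List.getElem?_eq_getElem (by simpa using hj :
          j < ((List.range max_w).map (pvFirstAt ls)).length)]
    simp
  · rw [List.getElem?_eq_none (by simpa using hj),
        List.getElem?_eq_none (by simpa using hj)]
    simp

-- ===== VERDICT (by name: the statement is the Claim_ definition above) =====
theorem overlay_lines_py_spec : Claim_equal_overlay_lines_py := by
  intro group _
  unfold Spec_overlay_lines_py overlay_lines_py overlay_lines_py_alt
  match group with
  | [] => rfl
  | [l] => rfl
  | a :: b :: rest =>
    show String.ofList _ = String.ofList _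
    rw [grid_eq]
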